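-- pv_equiv track=rewrite | github.com/Yzey1/ApproxDBSCAN_pyspark | utils.py | grid_index_mapping
-- ===== SOURCE A (Python) =====
-- from itertools import product
--
-- def grid_index_mapping(n_grid_each_dim):
--     grid_index = []
--     for i in n_grid_each_dim:
--         grid_index.append(range(i))
--     grid_index = list(product(*grid_index))
--     pos_to_gid = {}
--     gid_to_pos = {}
--     for n in range(len(grid_index)):
--         pos_to_gid[grid_index[n]] = n
--         gid_to_pos[n] = grid_index[n]
--     return pos_to_gid, gid_to_pos
-- ===== SOURCE B (Python) =====
-- def grid_index_mapping(n_grid_each_dim):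
--     total = 1
--     for d in n_grid_each_dim:
--         total = total * d if d > 0 else 0
--     pos_to_gid = {}
--     gid_to_pos = {}
--     for gid in range(total):
--         g = gid
--         digits = []
--         for d in reversed(n_grid_each_dim):
--             digits.append(g % d)
--             g //= d
--         pos = tuple(reversed(digits))
--         pos_to_gid[pos] = gid
--         gid_to_pos[gid] = pos
--     return pos_to_gid, gid_to_pos
-- ===== Notes on version B (the rewrite author's own statement) =====
-- stated objective: alternative
-- what changed: replaces itertools.product Cartesian enumeration (build all position tuples, then index them) with mixed-radix arithmetic: loop gid over range(prod dims) and decode each gid into its position by repeated mod/floordiv over the reversed dims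
import Mathlib
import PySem

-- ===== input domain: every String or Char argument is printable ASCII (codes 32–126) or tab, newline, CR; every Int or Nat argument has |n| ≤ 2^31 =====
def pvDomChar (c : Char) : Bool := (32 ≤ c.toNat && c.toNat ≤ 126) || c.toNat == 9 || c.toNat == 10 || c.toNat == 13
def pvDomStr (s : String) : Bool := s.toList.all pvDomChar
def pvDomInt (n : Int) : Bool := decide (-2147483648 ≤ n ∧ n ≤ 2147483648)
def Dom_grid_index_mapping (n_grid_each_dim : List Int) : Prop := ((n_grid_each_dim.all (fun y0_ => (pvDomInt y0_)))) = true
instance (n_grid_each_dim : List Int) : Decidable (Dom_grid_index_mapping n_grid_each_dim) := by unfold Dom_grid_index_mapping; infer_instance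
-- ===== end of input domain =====

-- B replaces itertools.product Cartesian enumeration by mixed-radix decoding of each grid id
-- (gid % d, gid //= d over the reversed dims); alternative decomposition, same asymptotic cost.

-- ===== PORT A =====
-- itertools.product over a list of lists (lexicographic, last factor fastest)
def pvProduct : List (List Int) → List (List Int)
  | [] => [[]]
  | [] :: _ => []  -- an empty pool: product yields nothing without enumerating the other pools
  | r :: rs =>
    let rest := pvProduct rs
    r.flatMap (fun x => rest.map (fun t => x :: t))

def grid_index_mapping (n_grid_each_dim : List Int) : (List (List Int × Int)) × (List (Int × List Int)) :=
  let grid_index := n_grid_each_dim.foldl (fun acc i => acc ++ [PySem.List.pyRange 0 i 1]) []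
  let grid_index := pvProduct grid_index
  let st := (PySem.List.pyRange 0 (grid_index.length : Int) 1).foldl
      (fun (st : PySem.Dict (List Int) Int × PySem.Dict Int (List Int)) n =>
        (st.1.insert (PySem.List.pyGetD grid_index n []) n,
         st.2.insert n (PySem.List.pyGetD grid_index n [])))
      (PySem.Dict.empty, PySem.Dict.empty)
  (st.1.items, st.2.items)

-- ===== PORT B =====
-- the inner 'for d in reversed(dims): digits.append(g % d); g //= d' loop of Source B
def pvDecodeLoop (st : List Int × Int) (dims : List Int) : List Int × Int :=
  dims.foldl (fun st d => (st.1 ++ [PySem.Int.mod st.2 d], PySem.Int.floordiv st.2 d)) st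

def pvDecode (dims : List Int) (gid : Int) : List Int :=
  (pvDecodeLoop ([], gid) dims.reverse).1.reverse

def grid_index_mapping_alt (n_grid_each_dim : List Int) : (List (List Int × Int)) × (List (Int × List Int)) :=
  let total := n_grid_each_dim.foldl (fun t d => if d > 0 then t * d else 0) 1
  let st := (PySem.List.pyRange 0 total 1).foldl
      (fun (st : PySem.Dict (List Int) Int × PySem.Dict Int (List Int)) gid =>
        let pos := pvDecode n_grid_each_dim gid
        (st.1.insert pos gid, st.2.insert gid pos))
      (PySem.Dict.empty, PySem.Dict.empty)
  (st.1.items, st.2.items)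

-- ===== PRECONDITION & SPEC =====
def Spec_grid_index_mapping (n_grid_each_dim : List Int) (out : (List (List Int × Int)) × (List (Int × List Int))) : Prop := out = grid_index_mapping_alt n_grid_each_dim
instance (n_grid_each_dim : List Int) (out : (List (List Int × Int)) × (List (Int × List Int))) : Decidable (Spec_grid_index_mapping n_grid_each_dim out) := by unfold Spec_grid_index_mapping; infer_instance

-- ===== CLAIM (what is proved, stated in full; the proofs are below) =====
def Claim_equal_grid_index_mapping : Prop := ∀ (n_grid_each_dim : List Int), Dom_grid_index_mapping n_grid_each_dim → Spec_grid_index_mapping n_grid_each_dim (grid_index_mapping n_grid_each_dim)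

-- ===== LEMMAS AND PROOFS =====

-- B's 'total' accumulator: from 0 it stays 0
theorem pvTot_from_zero (l : List Int) :
    l.foldl (fun t d => if d > 0 then t * d else 0) 0 = 0 := by
  induction l with
  | nil => rfl
  | cons d l ih => simp only [List.foldl_cons]; split_ifs <;> simpa

-- all dims positive: total = init * prod
theorem pvTot_allpos (l : List Int) (h : ∀ d ∈ l, 0 < d) (t : Int) :
    l.foldl (fun t d => if d > 0 then t * d else 0) t = t * l.prod := by
  induction l generalizing t with
  | nil => simp
  | cons d l ih =>
    have hd := h d (by simp)
    simp only [List.foldl_cons, if_pos hd, List.prod_cons]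
    rw [ih (fun x hx => h x (by simp [hx])), mul_assoc]

-- some dim nonpositive: total = 0
theorem pvTot_zero (l : List Int) (h : ¬ ∀ d ∈ l, 0 < d) (t : Int) :
    l.foldl (fun t d => if d > 0 then t * d else 0) t = 0 := by
  induction l generalizing t with
  | nil => exact absurd (by simp) h
  | cons d l ih =>
    simp only [List.foldl_cons]
    by_cases hd : 0 < d
    · rw [if_pos hd]
      exact ih (fun hall => h (by intro x hx; rcases List.mem_cons.mp hx with rfl | hx; exacts [hd, hall x hx])) _
    · rw [if_neg hd]; exact pvTot_from_zero l

-- the short-circuit on an empty pool is value-preserving: one unfolding equation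
theorem pvProduct_cons (r : List Int) (rs : List (List Int)) :
    pvProduct (r :: rs) = r.flatMap (fun x => (pvProduct rs).map (fun t => x :: t)) := by
  cases r <;> rfl

-- some dim nonpositive: the Cartesian product is empty
theorem pvProduct_nil (l : List Int) (h : ¬ ∀ d ∈ l, 0 < d) :
    pvProduct (l.map (fun i => PySem.List.pyRange 0 i 1)) = [] := by
  induction l with
  | nil => exact absurd (by simp) h
  | cons d l ih =>
    simp only [List.map_cons, pvProduct_cons]
    by_cases hd : 0 < d
    · rw [ih (fun hall => h (by intro x hx; rcases List.mem_cons.mp hx with rfl | hx; exacts [hd, hall x hx]))]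
      simp
    · rw [PySem.List.pyRange_one_eq_nil (by omega)]; rfl

-- unfolding equations for the digit loop
theorem pvDecodeLoop_cons (acc : List Int) (g d : Int) (l : List Int) :
    pvDecodeLoop (acc, g) (d :: l)
      = pvDecodeLoop (acc ++ [PySem.Int.mod g d], PySem.Int.floordiv g d) l := rfl

theorem pvDecodeLoop_append (st : List Int × Int) (l1 l2 : List Int) :
    pvDecodeLoop st (l1 ++ l2) = pvDecodeLoop (pvDecodeLoop st l1) l2 := by
  simp [pvDecodeLoop, List.foldl_append]

-- accumulator of the digit loop is append-only
theorem pvDecodeLoop_acc (l : List Int) : ∀ acc g,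
    pvDecodeLoop (acc, g) l = (acc ++ (pvDecodeLoop ([], g) l).1, (pvDecodeLoop ([], g) l).2) := by
  induction l with
  | nil => intro acc g; simp [pvDecodeLoop]
  | cons d l ih =>
    intro acc g
    rw [pvDecodeLoop_cons, pvDecodeLoop_cons, List.nil_append, ih, ih [PySem.Int.mod g d]]
    simp

-- for 0 ≤ g < prod l (all positive) the running quotient ends at 0
theorem pvDecodeLoop_snd (l : List Int) (h : ∀ d ∈ l, 0 < d) : ∀ g, 0 ≤ g → g < l.prod →
    (pvDecodeLoop ([], g) l).2 = 0 := by
  induction l with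
  | nil => intro g h0 h1; simp only [List.prod_nil] at h1; simp [pvDecodeLoop]; omega
  | cons d l ih =>
    intro g h0 h1
    have hd := h d (by simp)
    have hl := fun x hx => h x (List.mem_cons_of_mem _ hx)
    have hP : 0 < l.prod := List.prod_pos hl
    rw [pvDecodeLoop_cons, List.nil_append, pvDecodeLoop_acc]
    exact ih hl _
      ((PySem.Int.le_floordiv_iff_mul_le hd).mpr (by simpa using h0))
      ((PySem.Int.floordiv_lt_iff_lt_mul hd).mpr (by rw [List.prod_cons] at h1; linarith [h1, mul_comm d l.prod]))

-- adding x * prod l shifts only the final quotient, not the digits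
theorem pvDecodeLoop_shift (l : List Int) (h : ∀ d ∈ l, 0 < d) : ∀ x y,
    pvDecodeLoop ([], x * l.prod + y) l
      = ((pvDecodeLoop ([], y) l).1, x + (pvDecodeLoop ([], y) l).2) := by
  induction l with
  | nil => intro x y; simp [pvDecodeLoop]
  | cons d l ih =>
    intro x y
    have hd := h d (by simp)
    have hl := fun x hx => h x (List.mem_cons_of_mem _ hx)
    have hmod : PySem.Int.mod (x * (d :: l).prod + y) d = PySem.Int.mod y d := by
      rw [PySem.Int.mod_eq_emod_of_pos hd, PySem.Int.mod_eq_emod_of_pos hd, List.prod_cons]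
      rw [show x * (d * l.prod) + y = y + (x * l.prod) * d by ring]
      exact Int.add_mul_emod_self_right _ _ _
    have hdiv : PySem.Int.floordiv (x * (d :: l).prod + y) d
        = x * l.prod + PySem.Int.floordiv y d := by
      rw [PySem.Int.floordiv_eq_ediv_of_pos hd, PySem.Int.floordiv_eq_ediv_of_pos hd, List.prod_cons]
      rw [show x * (d * l.prod) + y = y + (x * l.prod) * d by ring]
      rw [Int.add_mul_ediv_right _ _ (by omega : d ≠ 0)]
      ring
    rw [pvDecodeLoop_cons, pvDecodeLoop_cons, hmod, hdiv, List.nil_append,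
        pvDecodeLoop_acc, ih hl, pvDecodeLoop_acc l [PySem.Int.mod y d]]

-- one decoding step: decode (d :: rest) (x * prod rest + y) = x :: decode rest y
theorem pvDecode_cons (d : Int) (rest : List Int) (hd : 0 < d)
    (hrest : ∀ e ∈ rest, 0 < e) (x y : Int) (hx0 : 0 ≤ x) (hx1 : x < d)
    (hy0 : 0 ≤ y) (hy1 : y < rest.prod) :
    pvDecode (d :: rest) (x * rest.prod + y) = x :: pvDecode rest y := by
  have hrev : ∀ e ∈ rest.reverse, 0 < e := fun e he => hrest e (List.mem_reverse.mp he)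
  have hprod : rest.reverse.prod = rest.prod := List.prod_reverse rest
  unfold pvDecode
  rw [List.reverse_cons, pvDecodeLoop_append,
      show x * rest.prod + y = x * rest.reverse.prod + y by rw [hprod],
      pvDecodeLoop_shift rest.reverse hrev, pvDecodeLoop_snd rest.reverse hrev y hy0 (by rwa [hprod]),
      add_zero, pvDecodeLoop_cons,
      show PySem.Int.mod x d = x by rw [PySem.Int.mod_eq_emod_of_pos hd]; exact Int.emod_eq_of_lt hx0 hx1]
  simp [pvDecodeLoop]

-- range(c, c+T) is range(T) shifted by c
theorem pvRange_shift (c T : Int) :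
    PySem.List.pyRange c (c + T) 1 = (PySem.List.pyRange 0 T 1).map (fun y => c + y) := by
  rw [PySem.List.pyRange_one c (c + T), PySem.List.pyRange_one 0 T]
  simp [List.map_map, Function.comp_def, add_sub_cancel_left]

-- range(d*T) splits into d blocks of length T
theorem pvRange_mul_split (d T : Int) (hd : 0 ≤ d) (hT : 0 ≤ T) :
    PySem.List.pyRange 0 (d * T) 1
      = (PySem.List.pyRange 0 d 1).flatMap (fun x => (PySem.List.pyRange 0 T 1).map (fun y => x * T + y)) := by
  induction d, hd using Int.le_induction with
  | base => simp [PySem.List.pyRange_one_eq_nil]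
  | succ d hd ih =>
    have h1 : 0 ≤ d * T := mul_nonneg hd hT
    rw [show (d + 1) * T = d * T + T by ring,
        PySem.List.pyRange_one_append 0 (d * T) (d * T + T) h1 (by omega),
        pvRange_shift (d * T) T, ih,
        PySem.List.pyRange_one_succ_right hd, List.flatMap_append]
    simp

-- main lemma: the Cartesian product of the ranges IS the decoded id sequence
theorem pvProduct_eq_map_decode (l : List Int) (h : ∀ d ∈ l, 0 < d) :
    pvProduct (l.map (fun i => PySem.List.pyRange 0 i 1))
      = (PySem.List.pyRange 0 l.prod 1).map (pvDecode l) := by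
  induction l with
  | nil => decide
  | cons d rest ih =>
    have hd := h d (by simp)
    have hrest := fun x hx => h x (List.mem_cons_of_mem _ hx)
    have hP : 0 < rest.prod := List.prod_pos hrest
    simp only [List.map_cons, pvProduct_cons, ih hrest, List.prod_cons]
    rw [pvRange_mul_split d rest.prod (by omega) (by omega), List.map_flatMap]
    apply List.flatMap_congr
    intro x hx
    obtain ⟨hx0, hx1⟩ := PySem.List.mem_pyRange_one.mp hx
    rw [List.map_map, List.map_map]
    apply List.map_congr_left
    intro y hy
    obtain ⟨hy0, hy1⟩ := PySem.List.mem_pyRange_one.mp hy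
    simp only [Function.comp_apply]
    exact (pvDecode_cons d rest hd hrest x y hx0 hx1 hy0 hy1).symm

-- ===== VERDICT (by name: the statement is the Claim_ definition above) =====
theorem grid_index_mapping_spec : Claim_equal_grid_index_mapping := by
  intro dims _
  unfold Spec_grid_index_mapping grid_index_mapping grid_index_mapping_alt
  rw [PySem.List.foldl_append_singleton_eq_map (fun i => PySem.List.pyRange 0 i 1) dims []]
  simp only [List.nil_append]
  by_cases h : ∀ d ∈ dims, 0 < d
  · have hP : 0 < dims.prod := List.prod_pos h
    rw [pvProduct_eq_map_decode dims h, pvTot_allpos dims h 1, one_mul]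
    have hlen : (((PySem.List.pyRange 0 dims.prod 1).map (pvDecode dims)).length : Int) = dims.prod := by
      rw [List.length_map, PySem.List.length_pyRange_one]; omega
    rw [hlen]
    rw [PySem.List.foldl_congr_mem _ _
      (fun (st : PySem.Dict (List Int) Int × PySem.Dict Int (List Int)) gid =>
        (st.1.insert (pvDecode dims gid) gid, st.2.insert gid (pvDecode dims gid))) _ ?_]
    intro acc n hn
    obtain ⟨hn0, hn1⟩ := PySem.List.mem_pyRange_one.mp hn
    rw [PySem.List.pyGetD_map_pyRange_of_nonneg (pvDecode dims) dims.prod n [] hn0 hn1]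
  · rw [pvProduct_nil dims h, pvTot_zero dims h 1]
    simp [PySem.List.pyRange_one_eq_nil]
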